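-- pv_equiv track=rewrite | github.com/leonore/twitter-parser | tweet_networks.py | hashtag_network_statistics
-- ===== SOURCE A (Python) =====
-- import itertools
--
-- def hashtag_network_statistics(hashtags):
--     """
--     Function to get ties/triads information from a hashtag network
--     :hashtag -> nested lists of hashtags obtained with hashtag_interaction()
--     """
--     ties = 0
--     visited = []
--     triads = 0
--     for tag_list in hashtags:
--         # single used hashtags aren't used in conjuction with others
--         if len(tag_list) > 1:
--             # we don't want to count duplicates ties or triads
--             if tag_list not in visited:
--                 if len(tag_list) > 1:
--                     if len(tag_list) >= 2:
--                         # get all (non-ordered, non-repetitive) combinations of 2 (a tie) from the list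
--                         ties += sum(1 for ignore in itertools.combinations(tag_list, 2))
--                     if len(tag_list) > 2:
--                         # get all (non-ordered, non-repetitive) combinations of 3 (a triad) from the list
--                         triads += sum(1 for ignore in itertools.combinations(tag_list, 3))
--                 for h in tag_list: # compare each hashtag to other hashtags in its list
--                     for other in tag_list:
--                         if h != other:
--                             for visited_list in visited: # if the other hashtag has been mentioned in another list
--                                 if other in visited_list:
--                                     triads += len(visited_list)-1 # create the appropriate number of triads (A-B-X for X in B's hashtag list)
--                 visited.append(tag_list)
--
--     return triads, ties
-- ===== SOURCE B (Python) =====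
-- def hashtag_network_statistics(hashtags):
--     """
--     Function to get ties/triads information from a hashtag network
--     :hashtag -> nested lists of hashtags obtained with hashtag_interaction()
--     """
--     ties = 0
--     triads = 0
--     seen = set()
--     weight = {}  # hashtag -> sum of (len(vl) - 1) over distinct processed lists vl containing it
--     for tag_list in hashtags:
--         n = len(tag_list)
--         if n > 1:
--             key = tuple(tag_list)
--             if key not in seen:
--                 seen.add(key)
--                 # closed-form combination counts
--                 ties += n * (n - 1) // 2
--                 triads += n * (n - 1) * (n - 2) // 6
--                 # multiplicities within this list
--                 cnt = {}
--                 for v in tag_list: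
--                     cnt[v] = cnt.get(v, 0) + 1
--                 # cross triads with previously processed lists
--                 for v in tag_list:
--                     triads += (n - cnt.get(v, 0)) * weight.get(v, 0)
--                 # account this list in the weights
--                 for v in cnt:
--                     weight[v] = weight.get(v, 0) + (n - 1)
--     return triads, ties
-- ===== Notes on version B (the rewrite author's own statement) =====
-- stated objective: faster
-- what changed: Replaces per-list enumeration of itertools combinations and the quadruple loop over pairs x visited lists with closed-form n-choose-k formulas, a seen-set for dedup, and a hashtag->accumulated-weight dict, giving one pass over the tags.
import Mathlib
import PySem

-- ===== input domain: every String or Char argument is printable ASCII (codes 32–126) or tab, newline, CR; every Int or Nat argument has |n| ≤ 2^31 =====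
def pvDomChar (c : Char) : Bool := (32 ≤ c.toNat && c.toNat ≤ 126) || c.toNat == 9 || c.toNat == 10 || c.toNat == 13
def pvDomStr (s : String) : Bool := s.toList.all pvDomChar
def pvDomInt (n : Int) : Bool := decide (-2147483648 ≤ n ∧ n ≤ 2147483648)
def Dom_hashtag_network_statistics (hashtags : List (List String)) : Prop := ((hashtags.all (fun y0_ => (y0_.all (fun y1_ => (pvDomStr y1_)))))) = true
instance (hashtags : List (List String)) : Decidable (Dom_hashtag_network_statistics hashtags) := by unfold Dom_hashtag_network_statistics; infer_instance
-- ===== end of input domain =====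

-- B replaces A's combination enumeration and quadruple cross loop by closed-form
-- n-choose-k formulas plus a seen-set and a hashtag→accumulated-weight dict (one pass over the tags).

-- ===== PORT A =====
-- sum(1 for _ in itertools.combinations(l, k)) counts the k-combinations: (l.sublistsLen k).length
def hashtag_network_statistics (hashtags : List (List String)) : Int × Int :=
  let st :=
    hashtags.foldl
      (fun (st : Int × List (List String) × Int) tag_list =>
        let ties := st.1
        let visited := st.2.1
        let triads := st.2.2
        if tag_list.length > 1 then
          if tag_list ∈ visited then st
          else
            let tt :=
              if tag_list.length > 1 then
                ((if tag_list.length ≥ 2 then ties + ((tag_list.sublistsLen 2).length : Int) else ties),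
                 (if tag_list.length > 2 then triads + ((tag_list.sublistsLen 3).length : Int) else triads))
              else (ties, triads)
            let triads :=
              tag_list.foldl
                (fun acc h =>
                  tag_list.foldl
                    (fun acc other =>
                      if h ≠ other then
                        visited.foldl
                          (fun acc vl => if other ∈ vl then acc + ((vl.length : Int) - 1) else acc)
                          acc
                      else acc)
                    acc)
                tt.2
            (tt.1, visited ++ [tag_list], triads)
        else st)
      (0, [], 0)
  (st.2.2, st.1)

-- ===== PORT B =====
def hashtag_network_statistics_alt (hashtags : List (List String)) : Int × Int :=
  let st :=
    hashtags.foldl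
      (fun (st : Int × Int × PySem.Set (List String) × PySem.Dict String Int) tag_list =>
        let ties := st.1
        let triads := st.2.1
        let seen := st.2.2.1
        let weight := st.2.2.2
        let n : Int := (tag_list.length : Int)
        if n > 1 then
          if PySem.Set.contains seen tag_list then st
          else
            let seen := PySem.Set.add seen tag_list
            let ties := ties + PySem.Int.floordiv (n * (n - 1)) 2
            let triads := triads + PySem.Int.floordiv (n * (n - 1) * (n - 2)) 6
            let cnt := tag_list.foldl (fun (d : PySem.Dict String Int) v => d.insert v (d.getD v 0 + 1)) PySem.Dict.empty
            let triads := tag_list.foldl (fun acc v => acc + (n - cnt.getD v 0) * weight.getD v 0) triads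
            let weight := cnt.keys.foldl (fun (w : PySem.Dict String Int) v => w.insert v (w.getD v 0 + (n - 1))) weight
            (ties, triads, seen, weight)
        else st)
      (0, 0, PySem.Set.empty, PySem.Dict.empty)
  (st.2.1, st.1)

-- ===== PRECONDITION & SPEC =====
def Spec_hashtag_network_statistics (hashtags : List (List String)) (out : Int × Int) : Prop := out = hashtag_network_statistics_alt hashtags
instance (hashtags : List (List String)) (out : Int × Int) : Decidable (Spec_hashtag_network_statistics hashtags out) := by unfold Spec_hashtag_network_statistics; infer_instance

-- ===== CLAIM (what is proved, stated in full; the proofs are below) =====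
def Claim_equal_hashtag_network_statistics : Prop := ∀ (hashtags : List (List String)), Dom_hashtag_network_statistics hashtags → Spec_hashtag_network_statistics hashtags (hashtag_network_statistics hashtags)

-- ===== LEMMAS AND PROOFS =====

-- accumulated weight of a tag over the visited lists: Σ (len(vl) - 1) over vl containing it
def pvW (visited : List (List String)) (v : String) : Int :=
  (visited.map (fun vl => if v ∈ vl then ((vl.length : Int) - 1) else 0)).sum

theorem pvW_append (visited : List (List String)) (l : List String) (v : String) :
    pvW (visited ++ [l]) v = pvW visited v + (if v ∈ l then ((l.length : Int) - 1) else 0) := by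
  simp [pvW]

-- choose-2 as Python floor division
theorem pv_choose_two (m : Nat) :
    ((m.choose 2 : Nat) : Int) = PySem.Int.floordiv ((m : Int) * ((m : Int) - 1)) 2 := by
  cases m with
  | zero => decide
  | succ k =>
    have h1 : ((k + 1 : Nat) : Int) - 1 = (k : Nat) := by push_cast; ring
    rw [h1]
    rw [show ((k+1 : Nat) : Int) * (k : Int) = (((k+1) * k : Nat) : Int) by push_cast; ring]
    rw [show (2 : Int) = ((2 : Nat) : Int) by norm_num, PySem.Int.floordiv_natCast]
    norm_cast
    simp [Nat.choose_two_right]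

theorem pv_nat_choose_three (m : Nat) : m.choose 3 = m * (m - 1) * (m - 2) / 6 := by
  rw [Nat.choose_eq_descFactorial_div_factorial]
  congr 1
  simp [Nat.descFactorial]
  ring

-- choose-3 as Python floor division
theorem pv_choose_three (m : Nat) :
    ((m.choose 3 : Nat) : Int) = PySem.Int.floordiv ((m : Int) * ((m : Int) - 1) * ((m : Int) - 2)) 6 := by
  match m with
  | 0 => decide
  | 1 => decide
  | 2 => decide
  | (k+3) =>
    have h1 : ((k + 3 : Nat) : Int) - 1 = ((k + 2 : Nat) : Int) := by push_cast; ring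
    have h2 : ((k + 3 : Nat) : Int) - 2 = ((k + 1 : Nat) : Int) := by push_cast; ring
    rw [h1, h2]
    rw [show ((k+3 : Nat) : Int) * ((k+2 : Nat) : Int) * ((k+1 : Nat) : Int) = (((k+3) * (k+2) * (k+1) : Nat) : Int) by push_cast; ring]
    rw [show (6 : Int) = ((6 : Nat) : Int) by norm_num, PySem.Int.floordiv_natCast]
    norm_cast
    rw [pv_nat_choose_three, show k+3-1 = k+2 from by omega, show k+3-2 = k+1 from by omega]

-- getD after B's weight-update loop over a Nodup key list
theorem pv_getD_update_loop (ks : List String) (hnd : ks.Nodup) (w : PySem.Dict String Int)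
    (c : Int) (v : String) :
    (ks.foldl (fun (w : PySem.Dict String Int) v => w.insert v (w.getD v 0 + c)) w).getD v 0
      = w.getD v 0 + (if v ∈ ks then c else 0) := by
  induction ks generalizing w with
  | nil => simp
  | cons k ks ih =>
    simp only [List.nodup_cons] at hnd
    rw [List.foldl_cons, ih hnd.2]
    by_cases hv : v = k
    · subst hv
      rw [PySem.Dict.getD_insert_self]
      simp [hnd.1]
    · rw [PySem.Dict.getD_insert_of_ne (hne := hv)]
      simp [hv]

-- the innermost visited scan is an addition of pvW
theorem pv_inner_fold (visited : List (List String)) (acc : Int) (o : String) :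
    visited.foldl (fun acc vl => if o ∈ vl then acc + ((vl.length : Int) - 1) else acc) acc
      = acc + pvW visited o := by
  have h : (fun (acc : Int) (vl : List String) => if o ∈ vl then acc + ((vl.length : Int) - 1) else acc)
      = fun acc vl => acc + (if o ∈ vl then ((vl.length : Int) - 1) else 0) := by
    funext a vl; split <;> simp
  rw [h, PySem.List.foldl_add]
  rfl

-- double-sum swap
theorem pv_sum_swap {α β : Type} (l₁ : List α) (l₂ : List β) (f : α → β → Int) :
    (l₁.map (fun a => (l₂.map (f a)).sum)).sum = (l₂.map (fun b => (l₁.map (fun a => f a b)).sum)).sum := by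
  induction l₁ with
  | nil => simp
  | cons a l₁ ih =>
    simp only [List.map_cons, List.sum_cons, ih]
    rw [← PySem.List.sum_map_add_int]

theorem pv_countP_ne (l : List String) (o : String) :
    (l.countP (fun h => h ≠ o) : Int) = (l.length : Int) - (l.count o : Int) := by
  induction l with
  | nil => simp
  | cons x l ih =>
    rw [List.countP_cons, List.count_cons, List.length_cons]
    simp only [ne_eq, decide_not] at ih
    by_cases hx : x = o <;> simp [hx] <;> omega

-- A's cross loop equals B's weighted one-pass sum
theorem pv_cross (l : List String) (visited : List (List String)) (t : Int) :
    l.foldl (fun acc h => l.foldl (fun acc other =>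
        if h ≠ other then
          visited.foldl (fun acc vl => if other ∈ vl then acc + ((vl.length : Int) - 1) else acc) acc
        else acc) acc) t
      = t + (l.map (fun v => (((l.length : Int)) - (l.count v : Int)) * pvW visited v)).sum := by
  have hmid : ∀ (h : String) (acc : Int),
      l.foldl (fun acc other =>
        if h ≠ other then
          visited.foldl (fun acc vl => if other ∈ vl then acc + ((vl.length : Int) - 1) else acc) acc
        else acc) acc
      = acc + (l.map (fun o => if h ≠ o then pvW visited o else 0)).sum := by
    intro h acc
    have hfun : (fun (acc : Int) (other : String) =>
        if h ≠ other then
          visited.foldl (fun acc vl => if other ∈ vl then acc + ((vl.length : Int) - 1) else acc) acc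
        else acc)
        = fun acc other => acc + (if h ≠ other then pvW visited other else 0) := by
      funext a o
      by_cases ho : h ≠ o <;> simp [ho, pv_inner_fold]
    rw [hfun, PySem.List.foldl_add]
  have houter : (fun (acc : Int) (h : String) =>
      l.foldl (fun acc other =>
        if h ≠ other then
          visited.foldl (fun acc vl => if other ∈ vl then acc + ((vl.length : Int) - 1) else acc) acc
        else acc) acc)
      = fun acc h => acc + (l.map (fun o => if h ≠ o then pvW visited o else 0)).sum := by
    funext a h; exact hmid h a
  rw [houter, PySem.List.foldl_add]
  congr 1
  rw [pv_sum_swap]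
  congr 1
  apply List.map_congr_left
  intro o _
  have : (l.map (fun h => if h ≠ o then pvW visited o else 0))
       = l.map (fun h => (if h ≠ o then (1:Int) else 0) * pvW visited o) := by
    congr 1; funext h; split <;> simp
  rw [this, List.sum_map_mul_right]
  have h10 : (List.map (fun h => if h ≠ o then (1:Int) else 0) l).sum = (l.countP (fun h => h ≠ o) : Int) := by
    have h := PySem.List.sum_map_ite_one_zero (xs := l) (p := fun h => decide (h ≠ o))
    simpa using h
  rw [h10, pv_countP_ne]

-- the single induction carrying the invariant between A's and B's loop states
theorem pv_main (hs : List (List String)) (ties triads : Int) (visited : List (List String))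
    (seen : PySem.Set (List String)) (weight : PySem.Dict String Int)
    (hseen : ∀ x, x ∈ seen ↔ x ∈ visited)
    (hw : ∀ v, weight.getD v 0 = pvW visited v) :
    (let ra := hs.foldl
        (fun (st : Int × List (List String) × Int) tag_list =>
          let ties := st.1
          let visited := st.2.1
          let triads := st.2.2
          if tag_list.length > 1 then
            if tag_list ∈ visited then st
            else
              let tt :=
                if tag_list.length > 1 then
                  ((if tag_list.length ≥ 2 then ties + ((tag_list.sublistsLen 2).length : Int) else ties),
                   (if tag_list.length > 2 then triads + ((tag_list.sublistsLen 3).length : Int) else triads))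
                else (ties, triads)
              let triads :=
                tag_list.foldl
                  (fun acc h =>
                    tag_list.foldl
                      (fun acc other =>
                        if h ≠ other then
                          visited.foldl
                            (fun acc vl => if other ∈ vl then acc + ((vl.length : Int) - 1) else acc)
                            acc
                        else acc)
                      acc)
                  tt.2
              (tt.1, visited ++ [tag_list], triads)
          else st)
        (ties, visited, triads)
     let rb := hs.foldl
        (fun (st : Int × Int × PySem.Set (List String) × PySem.Dict String Int) tag_list =>
          let ties := st.1
          let triads := st.2.1
          let seen := st.2.2.1
          let weight := st.2.2.2
          let n : Int := (tag_list.length : Int)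
          if n > 1 then
            if PySem.Set.contains seen tag_list then st
            else
              let seen := PySem.Set.add seen tag_list
              let ties := ties + PySem.Int.floordiv (n * (n - 1)) 2
              let triads := triads + PySem.Int.floordiv (n * (n - 1) * (n - 2)) 6
              let cnt := tag_list.foldl (fun (d : PySem.Dict String Int) v => d.insert v (d.getD v 0 + 1)) PySem.Dict.empty
              let triads := tag_list.foldl (fun acc v => acc + (n - cnt.getD v 0) * weight.getD v 0) triads
              let weight := cnt.keys.foldl (fun (w : PySem.Dict String Int) v => w.insert v (w.getD v 0 + (n - 1))) weight
              (ties, triads, seen, weight)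
          else st)
        (ties, triads, seen, weight)
     (ra.2.2, ra.1) = (rb.2.1, rb.1)) := by
  induction hs generalizing ties triads visited seen weight with
  | nil => rfl
  | cons l hs ih =>
    simp only [List.foldl_cons]
    by_cases hn : l.length > 1
    · have hn' : ((1:Int) < (l.length : Int)) := by exact_mod_cast hn
      by_cases hm : l ∈ visited
      · have hc : PySem.Set.contains seen l = true := by
          rw [PySem.Set.contains_iff _ _]; exact (hseen l).mpr hm
        simp only [hn, hn', hm, hc, if_pos, gt_iff_lt]
        exact ih ties triads visited seen weight hseen hw
      · have hc : PySem.Set.contains seen l = false := by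
          rw [Bool.eq_false_iff]
          intro h
          exact hm ((hseen l).mp ((PySem.Set.contains_iff _ _).mp h))
        simp only [hn, hn', hm, hc, gt_iff_lt, if_pos, if_neg,
          Bool.false_eq_true, not_false_eq_true]
        have hts : (if l.length ≥ 2 then ties + ((l.sublistsLen 2).length : Int) else ties)
            = ties + PySem.Int.floordiv ((l.length : Int) * ((l.length : Int) - 1)) 2 := by
          rw [if_pos (by omega : l.length ≥ 2), List.length_sublistsLen, pv_choose_two]
        have htr1 : (if 2 < l.length then triads + ((l.sublistsLen 3).length : Int) else triads)
            = triads + PySem.Int.floordiv ((l.length : Int) * ((l.length : Int) - 1) * ((l.length : Int) - 2)) 6 := by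
          by_cases h3 : 2 < l.length
          · rw [if_pos h3, List.length_sublistsLen, pv_choose_three]
          · have h2 : l.length = 2 := by omega
            rw [if_neg h3, h2]
            norm_num
        have hcnt : ∀ v, (List.foldl (fun (d : PySem.Dict String Int) v => d.insert v (d.getD v 0 + 1)) PySem.Dict.empty l).getD v 0 = (l.count v : Int) := by
          intro v
          rw [PySem.Dict.getD_foldl_insert_add_one]
          simp
        have ecross : List.foldl (fun acc h => List.foldl (fun acc other =>
              if h ≠ other then
                List.foldl (fun acc vl => if other ∈ vl then acc + ((vl.length : Int) - 1) else acc) acc visited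
              else acc) acc l)
            (if 2 < l.length then triads + ((l.sublistsLen 3).length : Int) else triads) l
          = List.foldl (fun acc v => acc + (((l.length : Int)) - (List.foldl (fun (d : PySem.Dict String Int) v => d.insert v (d.getD v 0 + 1)) PySem.Dict.empty l).getD v 0) * weight.getD v 0)
            (triads + PySem.Int.floordiv ((l.length : Int) * ((l.length : Int) - 1) * ((l.length : Int) - 2)) 6) l := by
          rw [htr1, pv_cross]
          have hfun : (fun (acc : Int) v => acc + (((l.length : Int)) - (List.foldl (fun (d : PySem.Dict String Int) v => d.insert v (d.getD v 0 + 1)) PySem.Dict.empty l).getD v 0) * weight.getD v 0)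
              = fun acc v => acc + (((l.length : Int)) - (l.count v : Int)) * pvW visited v := by
            funext a v
            rw [hcnt v, hw v]
          rw [hfun, PySem.List.foldl_add]
        have hkeys : (List.foldl (fun (d : PySem.Dict String Int) v => d.insert v (d.getD v 0 + 1)) PySem.Dict.empty l).keys = PySem.Set.ofList l := by
          rw [PySem.Dict.keys_foldl_insert]
          simp [PySem.Set.update_nil_left]
        have hseen' : ∀ x, x ∈ PySem.Set.add seen l ↔ x ∈ visited ++ [l] := by
          intro x
          rw [PySem.Set.mem_add]
          simp [hseen x]
        have hw' : ∀ v, ((List.foldl (fun (d : PySem.Dict String Int) v => d.insert v (d.getD v 0 + 1)) PySem.Dict.empty l).keys.foldl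
              (fun (w : PySem.Dict String Int) v => w.insert v (w.getD v 0 + ((l.length : Int) - 1))) weight).getD v 0
            = pvW (visited ++ [l]) v := by
          intro v
          rw [hkeys, pv_getD_update_loop _ (PySem.Set.nodup_ofList l), hw, pvW_append]
          simp [PySem.Set.mem_ofList]
        rw [hts, ecross]
        exact ih _ _ _ _ _ hseen' hw'
    · have hn' : ¬ ((1:Int) < (l.length : Int)) := by exact_mod_cast hn
      simp only [hn, hn', gt_iff_lt, if_neg, not_false_eq_true]
      exact ih ties triads visited seen weight hseen hw

-- ===== VERDICT (by name: the statement is the Claim_ definition above) =====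
theorem hashtag_network_statistics_spec : Claim_equal_hashtag_network_statistics := by
  intro hashtags _
  unfold Spec_hashtag_network_statistics hashtag_network_statistics hashtag_network_statistics_alt
  exact pv_main hashtags 0 0 [] PySem.Set.empty PySem.Dict.empty (by simp [PySem.Set.empty]) (by simp [pvW])
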